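-- pv_equiv track=rewrite | github.com/martinrenner/code-quality-quiz | calculator/question 9/#2.py | _is_valid_operation
-- ===== SOURCE A (Python) =====
-- def _is_valid_operation(expression: str) -> bool:
--     """
--     Checks if the operations in the expression are valid.
--
--     :param expression: The expression to check.
--     :return: True if operations are valid, False otherwise.
--     """
--     operators = set("+-*/")
--     prev_char = None
--     for char in expression:
--         if char in operators and prev_char in operators:
--             return False
--         prev_char = char
--     return True
-- ===== SOURCE B (Python) =====
-- def _is_valid_operation(expression: str) -> bool:
--     """Valid iff no operator position has an operator at the next position:
--     first collect the set of indices holding operators, then check that the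
--     set contains no pair of successive integers."""
--     ops = {i for i, ch in enumerate(expression) if ch in "+-*/"}
--     return all(i + 1 not in ops for i in ops)
-- ===== Notes on version B (the rewrite author's own statement) =====
-- stated objective: alternative
-- what changed: Instead of scanning characters while tracking the previous one, B first builds the set of operator positions and then checks the set contains no two successive integers (i and i+1).
import Mathlib
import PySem

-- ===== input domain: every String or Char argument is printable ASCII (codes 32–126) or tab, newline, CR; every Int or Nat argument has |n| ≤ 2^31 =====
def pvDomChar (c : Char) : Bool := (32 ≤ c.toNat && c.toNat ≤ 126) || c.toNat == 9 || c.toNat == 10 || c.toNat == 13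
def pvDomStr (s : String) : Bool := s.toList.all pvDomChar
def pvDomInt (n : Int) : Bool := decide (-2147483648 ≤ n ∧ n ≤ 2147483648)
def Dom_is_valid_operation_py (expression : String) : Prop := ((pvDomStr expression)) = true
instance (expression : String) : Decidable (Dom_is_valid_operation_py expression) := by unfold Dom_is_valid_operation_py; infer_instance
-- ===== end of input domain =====

-- B replaces A's previous-character state machine by a two-stage check: collect the
-- set of operator positions, then test that no position's successor is also in the set
-- (alternative decomposition; same linear cost).

-- ===== PORT A =====
-- operators = set("+-*/")
def pvOperators : PySem.Set Char := PySem.Set.ofList "+-*/".toList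

-- 'prev_char in operators' with prev_char possibly None (None is never in the set)
def pvPrevInOps (prev : Option Char) : Bool :=
  match prev with
  | none => false
  | some c => PySem.Set.contains pvOperators c

-- the for-loop with early return; state = prev_char
def pvLoopA (prev : Option Char) (cs : List Char) : Bool :=
  match cs with
  | [] => true
  | c :: rest =>
      if PySem.Set.contains pvOperators c && pvPrevInOps prev then false
      else pvLoopA (some c) rest

def is_valid_operation_py (expression : String) : Bool :=
  pvLoopA none expression.toList

-- ===== PORT B =====
-- ch in "+-*/"
def pvIsOpB (c : Char) : Bool := "+-*/".toList.contains c

-- the set comprehension {i for i, ch in enumerate(expression) if ch in "+-*/"}: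
-- the filtered index list (indices are pairwise distinct, so a nodup PySem.Set)
def pvIdxFrom (k : Int) (cs : List Char) : List Int :=
  match cs with
  | [] => []
  | c :: rest => if pvIsOpB c then k :: pvIdxFrom (k + 1) rest else pvIdxFrom (k + 1) rest

-- all(i + 1 not in ops for i in ops)
def is_valid_operation_py_alt (expression : String) : Bool :=
  let ops : PySem.Set Int := PySem.Set.ofList (pvIdxFrom 0 expression.toList)
  ops.all (fun i => !(PySem.Set.contains ops (i + 1)))

-- ===== PRECONDITION & SPEC =====
def Spec_is_valid_operation_py (expression : String) (out : Bool) : Prop := out = is_valid_operation_py_alt expression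
instance (expression : String) (out : Bool) : Decidable (Spec_is_valid_operation_py expression out) := by unfold Spec_is_valid_operation_py; infer_instance

-- ===== CLAIM (what is proved, stated in full; the proofs are below) =====
def Claim_equal_is_valid_operation_py : Prop := ∀ (expression : String), Dom_is_valid_operation_py expression → Spec_is_valid_operation_py expression (is_valid_operation_py expression)

-- ===== LEMMAS AND PROOFS =====

-- both programs test membership in the same operator set
theorem pvContains_eq_isOpB (c : Char) :
    PySem.Set.contains pvOperators c = pvIsOpB c := by
  have h : pvOperators = "+-*/".toList := by decide
  rw [h]
  simp [PySem.Set.contains, pvIsOpB]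

-- "there is an adjacent operator pair", stated positionally
def PvAdj (cs : List Char) : Prop :=
  ∃ n : Nat, n + 1 < cs.length ∧ pvIsOpB (cs.getD n ' ') ∧ pvIsOpB (cs.getD (n + 1) ' ')

theorem pvAdj_nil : ¬ PvAdj [] := by rintro ⟨n, h, _⟩; simp at h

theorem pvAdj_single (c : Char) : ¬ PvAdj [c] := by
  rintro ⟨n, h, _⟩; simp at h

theorem pvAdj_cons_cons (p c : Char) (rest : List Char) :
    PvAdj (p :: c :: rest) ↔ (pvIsOpB p ∧ pvIsOpB c) ∨ PvAdj (c :: rest) := by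
  constructor
  · rintro ⟨n, hlen, h1, h2⟩
    cases n with
    | zero => exact Or.inl ⟨by simpa using h1, by simpa using h2⟩
    | succ m =>
        refine Or.inr ⟨m, ?_, ?_, ?_⟩
        · simp at hlen ⊢; omega
        · simpa using h1
        · simpa using h2
  · rintro (⟨h1, h2⟩ | ⟨m, hlen, h1, h2⟩)
    · exact ⟨0, by simp, by simpa using h1, by simpa using h2⟩
    · refine ⟨m + 1, ?_, ?_, ?_⟩
      · simp at hlen ⊢; omega
      · simpa using h1
      · simpa using h2

-- A's loop computes "no adjacent pair"
theorem pvLoopA_some_eq (cs : List Char) :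
    ∀ p : Char, pvLoopA (some p) cs = true ↔ ¬ PvAdj (p :: cs) := by
  induction cs with
  | nil =>
      intro p
      simp [pvLoopA, pvAdj_single]
  | cons c rest ih =>
      intro p
      rw [pvAdj_cons_cons]
      simp only [pvLoopA, pvPrevInOps, pvContains_eq_isOpB]
      by_cases h1 : pvIsOpB c = true <;> by_cases h2 : pvIsOpB p = true <;>
        simp [h1, h2, ih c]

theorem pvLoopA_none_eq (cs : List Char) : pvLoopA none cs = true ↔ ¬ PvAdj cs := by
  cases cs with
  | nil => simp [pvLoopA, pvAdj_nil]
  | cons c rest =>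
      simp only [pvLoopA, pvPrevInOps, Bool.and_false]
      rw [if_neg (by simp)]
      exact pvLoopA_some_eq rest c

-- membership in the index list
theorem mem_pvIdxFrom (cs : List Char) :
    ∀ (k i : Int), i ∈ pvIdxFrom k cs ↔
      ∃ n : Nat, n < cs.length ∧ i = k + n ∧ pvIsOpB (cs.getD n ' ') := by
  induction cs with
  | nil => intro k i; simp [pvIdxFrom]
  | cons c rest ih =>
      intro k i
      constructor
      · intro h
        by_cases hc : pvIsOpB c = true
        · simp only [pvIdxFrom, if_pos hc, List.mem_cons] at h
          rcases h with h | h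
          · exact ⟨0, by simp, by simp [h], by simpa using hc⟩
          · obtain ⟨n, hn, hi, hop⟩ := (ih (k + 1) i).mp h
            exact ⟨n + 1, by simp; omega, by push_cast at hi ⊢; omega, by simpa using hop⟩
        · simp only [pvIdxFrom, if_neg hc] at h
          obtain ⟨n, hn, hi, hop⟩ := (ih (k + 1) i).mp h
          exact ⟨n + 1, by simp; omega, by push_cast at hi ⊢; omega, by simpa using hop⟩
      · rintro ⟨n, hn, hi, hop⟩
        cases n with
        | zero =>
            simp only [List.getD_cons_zero] at hop
            simp [pvIdxFrom, if_pos hop, hi]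
        | succ m =>
            have hmem : i ∈ pvIdxFrom (k + 1) rest := by
              refine (ih (k + 1) i).mpr ⟨m, by simp at hn; omega, by push_cast at hi ⊢; omega, by simpa using hop⟩
            by_cases hc : pvIsOpB c = true
            · simp [pvIdxFrom, if_pos hc, hmem]
            · simpa [pvIdxFrom, if_neg hc] using hmem

-- B computes "no adjacent pair" too
theorem pvAlt_eq (cs : List Char) :
    ((PySem.Set.ofList (pvIdxFrom 0 cs)).all
        (fun i => !(PySem.Set.contains (PySem.Set.ofList (pvIdxFrom 0 cs)) (i + 1))) = true)
      ↔ ¬ PvAdj cs := by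
  constructor
  · intro h
    rintro ⟨n, hlen, h1, h2⟩
    have hmemn : (n : Int) ∈ pvIdxFrom 0 cs :=
      (mem_pvIdxFrom cs 0 n).mpr ⟨n, by omega, by ring, h1⟩
    have hmemn1 : ((n : Int) + 1) ∈ pvIdxFrom 0 cs :=
      (mem_pvIdxFrom cs 0 _).mpr ⟨n + 1, by omega, by push_cast; ring, h2⟩
    have hs : (n : Int) ∈ PySem.Set.ofList (pvIdxFrom 0 cs) := by
      simpa [PySem.Set.mem_ofList] using hmemn
    have := List.all_eq_true.mp h _ hs
    simp only [Bool.not_eq_true', PySem.Set.contains, List.contains_eq_mem,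
      decide_eq_false_iff_not] at this
    exact this (by simpa [PySem.Set.mem_ofList] using hmemn1)
  · intro h
    refine List.all_eq_true.mpr ?_
    intro i hi
    simp only [Bool.not_eq_true', PySem.Set.contains]
    rw [Bool.eq_false_iff]
    intro hcon
    have hi' : i ∈ pvIdxFrom 0 cs := by simpa [PySem.Set.mem_ofList] using hi
    have hi1 : (i + 1) ∈ pvIdxFrom 0 cs := by
      have := List.contains_iff_mem.mp hcon
      simpa [PySem.Set.mem_ofList] using this
    obtain ⟨n, hn, hni, hop⟩ := (mem_pvIdxFrom cs 0 i).mp hi'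
    obtain ⟨m, hm, hmi, hop'⟩ := (mem_pvIdxFrom cs 0 (i + 1)).mp hi1
    have hmn : m = n + 1 := by omega
    subst hmn
    exact h ⟨n, hm, by simpa [hni] using hop, by simpa using hop'⟩

-- ===== VERDICT (by name: the statement is the Claim_ definition above) =====
theorem is_valid_operation_py_spec : Claim_equal_is_valid_operation_py := by
  intro e _
  unfold Spec_is_valid_operation_py is_valid_operation_py is_valid_operation_py_alt
  simp only []
  rw [Bool.eq_iff_iff, pvLoopA_none_eq, ← pvAlt_eq e.toList]
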